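-- pv_equiv track=rewrite | github.com/JohnAdler17/LearningPython | adler_john_prg7.py | count_perfect_matches
-- ===== SOURCE A (Python) =====
-- def count_perfect_matches(code, guess):
--     perfect_matches = 0
--     for character in guess:
--         if character in code:
--             index1 = code.find(character)
--             index2 = guess.find(character)
--             if index1 == index2:
--                 perfect_matches += 1
--     return perfect_matches
-- ===== SOURCE B (Python) =====
-- def count_perfect_matches(code, guess):
--     total = 0
--     for c in set(guess):
--         if c in code and code.find(c) == guess.find(c):
--             total += guess.count(c)
--     return total
-- ===== Notes on version B (the rewrite author's own statement) =====
-- stated objective: faster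
-- what changed: B iterates once over the distinct characters of guess (a set) and adds guess.count(c) for each qualifying character, instead of A's per-position loop that re-runs the membership test and both find() scans at every occurrence of the same character.
import Mathlib
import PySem

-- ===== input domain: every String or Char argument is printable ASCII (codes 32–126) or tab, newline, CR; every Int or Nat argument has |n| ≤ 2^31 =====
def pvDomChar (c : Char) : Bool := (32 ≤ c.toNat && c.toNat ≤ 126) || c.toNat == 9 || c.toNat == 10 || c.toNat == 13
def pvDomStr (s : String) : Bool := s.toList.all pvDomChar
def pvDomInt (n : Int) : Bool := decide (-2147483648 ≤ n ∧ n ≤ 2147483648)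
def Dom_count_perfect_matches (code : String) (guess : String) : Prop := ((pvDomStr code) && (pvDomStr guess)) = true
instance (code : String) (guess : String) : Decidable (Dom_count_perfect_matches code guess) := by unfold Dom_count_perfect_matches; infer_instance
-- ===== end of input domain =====

-- B groups the scan by distinct characters of guess and weights by guess.count(c); same result, different decomposition.

-- ===== PORT A =====
-- A: for each position of guess, add 1 when the character occurs in code at the same first index.
def count_perfect_matches (code : String) (guess : String) : Int :=
  guess.toList.foldl
    (fun perfect_matches character =>
      if PySem.Chars.isIn [character] code.toList then
        let index1 := PySem.Chars.find code.toList [character]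
        let index2 := PySem.Chars.find guess.toList [character]
        if index1 = index2 then perfect_matches + 1 else perfect_matches
      else perfect_matches)
    0

-- ===== PORT B =====
-- B: one pass over set(guess); each qualifying distinct character contributes guess.count(c).
def count_perfect_matches_alt (code : String) (guess : String) : Int :=
  (PySem.Set.ofList guess.toList).foldl
    (fun total c =>
      if PySem.Chars.isIn [c] code.toList = true ∧
         PySem.Chars.find code.toList [c] = PySem.Chars.find guess.toList [c] then
        total + (PySem.Chars.count guess.toList [c] : Int)
      else total)
    0

-- ===== PRECONDITION & SPEC =====
def Spec_count_perfect_matches (code : String) (guess : String) (out : Int) : Prop := out = count_perfect_matches_alt code guess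
instance (code : String) (guess : String) (out : Int) : Decidable (Spec_count_perfect_matches code guess out) := by unfold Spec_count_perfect_matches; infer_instance

-- ===== CLAIM (what is proved, stated in full; the proofs are below) =====
def Claim_equal_count_perfect_matches : Prop := ∀ (code : String) (guess : String), Dom_count_perfect_matches code guess → Spec_count_perfect_matches code guess (count_perfect_matches code guess)

-- ===== LEMMAS AND PROOFS =====

-- the shared per-character test
def pvMatchP (code guess : List Char) (c : Char) : Bool :=
  PySem.Chars.isIn [c] code && (PySem.Chars.find code [c] == PySem.Chars.find guess [c])

-- Python's s.count(c) for a single character is the list count.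
theorem pv_count_go_singleton (c : Char) : ∀ (l : List Char) (fuel acc : Nat), l.length ≤ fuel →
    PySem.Chars.count.go [c] fuel l acc = acc + l.count c := by
  intro l
  induction l with
  | nil => intro fuel acc h; cases fuel <;> simp [PySem.Chars.count.go]
  | cons x t ih =>
    intro fuel acc h
    cases fuel with
    | zero => simp at h
    | succ n =>
      simp only [PySem.Chars.count.go]
      by_cases hx : x = c
      · subst hx
        simp [List.isPrefixOf, ih n (acc+1) (by simpa using h)]
        omega
      · simp [List.isPrefixOf, show (c == x) = false by simp [Ne.symm hx],
              List.count_cons, Ne.symm hx, ih n acc (by simp at h; omega)]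
        exact hx

theorem pv_count_singleton (l : List Char) (c : Char) :
    PySem.Chars.count l [c] = l.count c := by
  simp [PySem.Chars.count]
  simpa using pv_count_go_singleton c l l.length 0 le_rfl

-- prepending a fresh character to the index list splits the filtered count
theorem pv_countP_cons_mem (p : Char → Bool) (c : Char) (d : List Char) (hc : c ∉ d)
    (l : List Char) : l.countP (fun x => p x && decide (x ∈ c :: d))
      = (if p c then l.count c else 0) + l.countP (fun x => p x && decide (x ∈ d)) := by
  induction l with
  | nil => simp
  | cons x t ih =>
    simp only [List.countP_cons, List.count_cons, ih]
    by_cases hx : x = c <;> by_cases hp : p x <;>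
      simp_all [List.mem_cons] <;> omega

-- the weighted fold over a duplicate-free character list equals a filtered position count
theorem pv_foldl_weighted (p : Char → Bool) (l : List Char) :
    ∀ (d : List Char), d.Nodup → ∀ (a : Int),
      d.foldl (fun acc c => if p c then acc + (l.count c : Int) else acc) a
        = a + (l.countP (fun x => p x && decide (x ∈ d)) : Int) := by
  intro d
  induction d with
  | nil => intro _ a; simp
  | cons c d ih =>
    intro hnd a
    have hc : c ∉ d := (List.nodup_cons.mp hnd).1
    simp only [List.foldl_cons, ih (List.nodup_cons.mp hnd).2,
      pv_countP_cons_mem p c d hc l]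
    by_cases hp : p c <;> simp [hp] <;> ring

-- A's fold is the position count of pvMatchP
theorem pv_A_eq_countP (code guess : String) :
    count_perfect_matches code guess
      = (guess.toList.countP (pvMatchP code.toList guess.toList) : Int) := by
  unfold count_perfect_matches
  have h : (fun (perfect_matches : Int) (character : Char) =>
      if PySem.Chars.isIn [character] code.toList then
        let index1 := PySem.Chars.find code.toList [character]
        let index2 := PySem.Chars.find guess.toList [character]
        if index1 = index2 then perfect_matches + 1 else perfect_matches
      else perfect_matches)
      = (fun acc x => if pvMatchP code.toList guess.toList x then acc + 1 else acc) := by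
    funext acc x
    simp only [pvMatchP, Bool.and_eq_true, beq_iff_eq]
    by_cases h1 : PySem.Chars.isIn [x] code.toList <;>
      by_cases h2 : PySem.Chars.find code.toList [x] = PySem.Chars.find guess.toList [x] <;>
      simp [h1, h2]
  rw [h, PySem.List.foldl_if_add_one]
  simp

-- B's fold is the weighted fold over the distinct characters
theorem pv_B_eq_weighted (code guess : String) :
    count_perfect_matches_alt code guess
      = (PySem.Set.ofList guess.toList).foldl
          (fun acc c => if pvMatchP code.toList guess.toList c then
            acc + (guess.toList.count c : Int) else acc) 0 := by
  unfold count_perfect_matches_alt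
  congr 1
  funext acc c
  simp only [pvMatchP, Bool.and_eq_true, beq_iff_eq, pv_count_singleton]

-- ===== VERDICT (by name: the statement is the Claim_ definition above) =====
theorem count_perfect_matches_spec : Claim_equal_count_perfect_matches := by
  intro code guess _
  unfold Spec_count_perfect_matches
  have hmem : List.countP
      (fun x => pvMatchP code.toList guess.toList x &&
        decide (x ∈ PySem.Set.ofList guess.toList)) guess.toList
      = List.countP (pvMatchP code.toList guess.toList) guess.toList := by
    apply List.countP_congr
    intro x hx
    simp [PySem.Set.mem_ofList, hx]
  rw [pv_A_eq_countP, pv_B_eq_weighted,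
    pv_foldl_weighted (pvMatchP code.toList guess.toList) guess.toList
      (PySem.Set.ofList guess.toList) (PySem.Set.nodup_ofList _) 0, hmem]
  simp
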